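-- pv_equiv track=rewrite | github.com/AmadoMiguel/Coding-problems | Python/April-2020/commonCharCount.py | commonCharacterCount2
-- ===== SOURCE A (Python) =====
-- def mM(m1,m2):
--     for k in m1.keys():
--         if k in m2.keys():
--             m1[k]=min(m1[k],m2[k])
--         else:
--             m1[k] = 0
--     return m1
--
-- def commonCharacterCount2(s):
--     if len(s) == 1:
--         return len(s[0])
--     sL,hM=len(s),{}
--     for l in s[0]:
--         hM[l]=hM.setdefault(l,0)+1
--     for w in s[1:]:
--         a = {}
--         for l in w:
--             a[l]=a.setdefault(l,0)+1
--         hM = mM(hM,a)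
--     return sum([n for n in hM.values()])
-- ===== SOURCE B (Python) =====
-- def commonCharacterCount2(s):
--     # Transposed two-phase shape: build one frequency dict per word up front,
--     # then scan the first word's distinct characters across all counters.
--     counters = []
--     for w in s:
--         d = {}
--         for ch in w:
--             d[ch] = d.get(ch, 0) + 1
--         counters.append(d)
--     total = 0
--     for ch in counters[0]:
--         total += min(c.get(ch, 0) for c in counters)
--     return total
-- ===== Notes on version B (the rewrite author's own statement) =====
-- stated objective: idiomatic
-- what changed: B builds all per-word frequency dicts first and then transposes: it loops character-outer/word-inner over the first word's distinct characters taking a min across all counters, instead of A's word-by-word fold that destructively merges a running map with each new word's map.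
import Mathlib
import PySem

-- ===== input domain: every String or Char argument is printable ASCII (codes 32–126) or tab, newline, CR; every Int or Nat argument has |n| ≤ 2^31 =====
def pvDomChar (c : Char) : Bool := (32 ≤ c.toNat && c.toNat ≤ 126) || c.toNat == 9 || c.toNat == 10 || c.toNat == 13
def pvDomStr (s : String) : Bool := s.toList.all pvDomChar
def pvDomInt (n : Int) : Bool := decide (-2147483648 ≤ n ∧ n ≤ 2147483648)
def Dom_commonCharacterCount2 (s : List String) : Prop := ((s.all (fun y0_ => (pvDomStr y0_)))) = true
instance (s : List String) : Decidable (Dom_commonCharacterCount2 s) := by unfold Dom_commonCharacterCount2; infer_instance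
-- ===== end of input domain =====

-- B builds all per-word frequency dicts first and then scans the first word's distinct
-- characters across all counters (character-outer/word-inner), instead of A's word-by-word
-- destructive merge of a running map; objective: idiomatic, same asymptotic cost.

-- ===== PORT A =====
def mM (m1 m2 : PySem.Dict Char Int) : PySem.Dict Char Int :=
  m1.keys.foldl (fun m k =>
    if m2.contains k then m.insert k (min (m.getD k 0) (m2.getD k 0))
    else m.insert k 0) m1

def commonCharacterCount2 (s : List String) : Int :=
  if s.length == 1 then PySem.Str.len (PySem.List.pyGetD s 0 "")
  else
    let hM0 : PySem.Dict Char Int :=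
      (PySem.List.pyGetD s 0 "").toList.foldl
        (fun hM l =>
          let hM' := hM.setdefault l 0
          hM'.insert l (hM'.getD l 0 + 1)) PySem.Dict.empty
    let hM :=
      (PySem.List.slice s (some 1) none).foldl
        (fun hM w =>
          let a :=
            w.toList.foldl
              (fun a l =>
                let a' := a.setdefault l 0
                a'.insert l (a'.getD l 0 + 1)) PySem.Dict.empty
          mM hM a) hM0
    (hM.values.map (fun n => n)).sum

-- ===== PORT B =====
def freqB (w : String) : PySem.Dict Char Int :=
  w.toList.foldl (fun d ch => d.insert ch (d.getD ch 0 + 1)) PySem.Dict.empty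

def commonCharacterCount2_alt (s : List String) : Int :=
  let counters := s.map freqB
  (PySem.List.pyGetD counters 0 PySem.Dict.empty).keys.foldl
    (fun total ch =>
      total + (PySem.List.min? (counters.map (fun c => c.getD ch 0)) (fun y => y)).getD 0)
    0

-- ===== PRECONDITION & SPEC =====
-- Pre_ excludes only the empty list, on which A raises IndexError (s[0]).
def Pre_commonCharacterCount2 (s : List String) : Prop := s ≠ []
instance (s : List String) : Decidable (Pre_commonCharacterCount2 s) := by unfold Pre_commonCharacterCount2; infer_instance
def pvWitness_commonCharacterCount2 : List String := ["abca", "bca"]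

def Spec_commonCharacterCount2 (s : List String) (out : Int) : Prop := out = commonCharacterCount2_alt s
instance (s : List String) (out : Int) : Decidable (Spec_commonCharacterCount2 s out) := by unfold Spec_commonCharacterCount2; infer_instance

-- ===== CLAIM (what is proved, stated in full; the proofs are below) =====
def Claim_equal_commonCharacterCount2 : Prop := ∀ (s : List String), Dom_commonCharacterCount2 s → Pre_commonCharacterCount2 s → Spec_commonCharacterCount2 s (commonCharacterCount2 s)

-- ===== LEMMAS AND PROOFS =====

-- A's counting-loop body (setdefault then store) is the plain counter-insert step.
lemma stepA_eq (d : PySem.Dict Char Int) (l : Char) :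
    (d.setdefault l 0).insert l ((d.setdefault l 0).getD l 0 + 1) = d.insert l (d.getD l 0 + 1) := by
  by_cases h : d.contains l = true
  · rw [PySem.Dict.setdefault_of_contains _ _ h]
  · have h' : d.contains l = false := by revert h; cases d.contains l <;> simp
    rw [PySem.Dict.setdefault_of_not_contains _ _ h', PySem.Dict.getD_insert_self,
      PySem.Dict.insert_insert_self]
    rw [PySem.Dict.getD_of_not_contains _ _ h']

lemma freqA_eq_counter (w : List Char) :
    w.foldl (fun a l => (a.setdefault l 0).insert l ((a.setdefault l 0).getD l 0 + 1))
        PySem.Dict.empty = PySem.Dict.counter w := by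
  have hf : (fun (a : PySem.Dict Char Int) (l : Char) =>
      (a.setdefault l 0).insert l ((a.setdefault l 0).getD l 0 + 1))
      = fun (a : PySem.Dict Char Int) (l : Char) => a.insert l (a.getD l 0 + 1) := by
    funext a l; exact stepA_eq a l
  rw [hf, PySem.Dict.foldl_insert_getD_add_one_eq_counter]

lemma freqB_eq_counter (w : String) : freqB w = PySem.Dict.counter w.toList := by
  unfold freqB; rw [PySem.Dict.foldl_insert_getD_add_one_eq_counter]

-- the body of mM's loop, named for the lemmas below (mM m1 m2 is definitionally this fold)
def mMstep (a m : PySem.Dict Char Int) (k : Char) : PySem.Dict Char Int :=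
  if a.contains k then m.insert k (min (m.getD k 0) (a.getD k 0)) else m.insert k 0

lemma mM_eq (m1 m2 : PySem.Dict Char Int) : mM m1 m2 = m1.keys.foldl (mMstep m2) m1 := rfl

-- invariant of mM's loop over a duplicate-free key list
lemma mM_go (a : PySem.Dict Char Int) (ks : List Char) :
    ∀ (m : PySem.Dict Char Int), ks.Nodup → (∀ k ∈ ks, m.contains k = true) →
      (ks.foldl (mMstep a) m).keys = m.keys ∧
      ∀ ch, (ks.foldl (mMstep a) m).getD ch 0 =
        if ch ∈ ks then (if a.contains ch then min (m.getD ch 0) (a.getD ch 0) else 0)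
        else m.getD ch 0 := by
  induction ks with
  | nil => intro m _ _; simp
  | cons k ks ih =>
    intro m hnd hc
    have hk : m.contains k = true := hc k (by simp)
    have hkeys : (mMstep a m k).keys = m.keys := by
      unfold mMstep; split_ifs <;> exact PySem.Dict.keys_insert_of_contains _ _ hk
    have hcont : ∀ k' ∈ ks, (mMstep a m k).contains k' = true := by
      intro k' hk'
      have := hc k' (by simp [hk'])
      unfold mMstep; split_ifs <;> simp [PySem.Dict.contains_insert, this]
    have hgd : ∀ ch, (mMstep a m k).getD ch 0 =
        if ch = k then (if a.contains k then min (m.getD k 0) (a.getD k 0) else 0)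
        else m.getD ch 0 := by
      intro ch; unfold mMstep
      by_cases hak : a.contains k <;> simp [hak, PySem.Dict.getD_insert]
    obtain ⟨ih1, ih2⟩ := ih (mMstep a m k) (List.nodup_cons.mp hnd).2 hcont
    refine ⟨by rw [List.foldl_cons, ih1, hkeys], ?_⟩
    intro ch
    rw [List.foldl_cons, ih2 ch]
    by_cases hks : ch ∈ ks
    · have hne : ch ≠ k := fun h => ((List.nodup_cons.mp hnd).1 (h ▸ hks)).elim
      simp [hks, hne, hgd ch]
    · by_cases hck : ch = k
      · subst hck; simp [hks, hgd ch]
      · simp [hks, hck, hgd ch]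

-- the whole word-by-word merge, per character: a running min of per-word counts
lemma foldl_mM (ws : List String) :
    ∀ (m : PySem.Dict Char Int), m.keys.Nodup →
      (ws.foldl (fun h v => mM h (PySem.Dict.counter v.toList)) m).keys = m.keys ∧
      ∀ ch, ch ∈ m.keys → 0 ≤ m.getD ch 0 →
        (ws.foldl (fun h v => mM h (PySem.Dict.counter v.toList)) m).getD ch 0 =
          ws.foldl (fun acc v => min acc ((v.toList.count ch : Int))) (m.getD ch 0) := by
  induction ws with
  | nil => intro m _; exact ⟨rfl, fun ch _ _ => rfl⟩
  | cons v ws ih =>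
    intro m hnd
    have hcontall : ∀ k ∈ m.keys, m.contains k = true :=
      fun k hk => (PySem.Dict.contains_iff_mem_keys m k).mpr hk
    obtain ⟨h1, h2⟩ := mM_go (PySem.Dict.counter v.toList) m.keys m hnd hcontall
    rw [← mM_eq] at h1 h2
    have hm' : ∀ ch ∈ m.keys, 0 ≤ m.getD ch 0 →
        (mM m (PySem.Dict.counter v.toList)).getD ch 0
          = min (m.getD ch 0) ((v.toList.count ch : Int)) := by
      intro ch hch hx
      rw [h2 ch, if_pos hch]
      by_cases hac : (PySem.Dict.counter v.toList).contains ch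
      · rw [if_pos hac, PySem.Dict.getD_counter]
      · rw [if_neg hac]
        have hnotmem : ch ∉ v.toList := by
          intro hmem
          exact hac (by rw [PySem.Dict.contains_counter]; exact List.contains_iff_mem.mpr hmem)
        rw [List.count_eq_zero_of_not_mem hnotmem]
        exact (min_eq_right hx).symm
    have hndm' : (mM m (PySem.Dict.counter v.toList)).keys.Nodup := by rw [h1]; exact hnd
    obtain ⟨ihk, ihg⟩ := ih (mM m (PySem.Dict.counter v.toList)) hndm'
    refine ⟨by rw [List.foldl_cons, ihk, h1], ?_⟩
    intro ch hch hx
    rw [List.foldl_cons, List.foldl_cons,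
      ihg ch (by rw [h1]; exact hch)
        (by rw [hm' ch hch hx]; exact le_min hx (Int.natCast_nonneg _)),
      hm' ch hch hx]

-- summing each distinct character's multiplicity recovers the length
lemma sum_count_ofList (l : List Char) :
    ((PySem.Set.ofList l).map (fun ch => ((l.count ch : Int)))).sum = (l.length : Int) := by
  have hperm : (PySem.Set.ofList l).Perm l.dedup :=
    (List.perm_ext_iff_of_nodup (PySem.Set.nodup_ofList l) l.nodup_dedup).mpr
      (fun x => by rw [PySem.Set.mem_ofList, List.mem_dedup])
  rw [(hperm.map _).sum_eq, ← List.sum_map_count_dedup_eq_length l, Nat.cast_list_sum,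
    List.map_map]
  rfl

-- B's per-character value is the same running min
lemma bval_eq (w : String) (ws : List String) (ch : Char) :
    ((PySem.List.min? ((freqB w).getD ch 0 :: (ws.map freqB).map (fun c => c.getD ch 0))
        (fun y => y)).getD 0)
      = ws.foldl (fun acc v => min acc ((v.toList.count ch : Int))) ((w.toList.count ch : Int)) := by
  rw [PySem.List.min?_id_cons, Option.getD_some, List.map_map, List.foldl_map]
  simp only [Function.comp_def, freqB_eq_counter, PySem.Dict.getD_counter]

-- ===== VERDICT (by name: the statement is the Claim_ definition above) =====
theorem commonCharacterCount2_spec : Claim_equal_commonCharacterCount2 := by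
  unfold Claim_equal_commonCharacterCount2
  intro s _ hpre
  unfold Spec_commonCharacterCount2
  obtain ⟨w, ws, rfl⟩ := List.exists_cons_of_ne_nil hpre
  unfold commonCharacterCount2 commonCharacterCount2_alt
  simp only [List.map_cons, PySem.List.pyGetD_zero_cons, PySem.List.slice_from_one,
    List.tail_cons]
  rw [PySem.List.foldl_add, zero_add]
  simp only [bval_eq]
  have hK : (freqB w).keys = PySem.Set.ofList w.toList := by
    rw [freqB_eq_counter, PySem.Dict.keys_counter]
  rw [hK]
  by_cases hws : ws = []
  · subst hws
    rw [if_pos (by rfl)]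
    simp only [List.foldl_nil]
    rw [show PySem.Str.len w = (w.toList.length : Int) from by
      simp [PySem.Str.len]]
    exact (sum_count_ofList w.toList).symm
  · rw [if_neg (by simp [hws])]
    have hfA : (fun (hM : PySem.Dict Char Int) (w : String) =>
        mM hM (List.foldl
          (fun a l => (a.setdefault l 0).insert l ((a.setdefault l 0).getD l 0 + 1))
          PySem.Dict.empty w.toList))
        = fun hM v => mM hM (PySem.Dict.counter v.toList) := by
      funext hM v; rw [freqA_eq_counter]
    rw [hfA, freqA_eq_counter]
    obtain ⟨h1, h2⟩ := foldl_mM ws (PySem.Dict.counter w.toList) (PySem.Dict.nodup_keys_counter _)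
    set r := ws.foldl (fun h v => mM h (PySem.Dict.counter v.toList)) (PySem.Dict.counter w.toList)
      with hr
    have hnr : r.keys.Nodup := by rw [h1]; exact PySem.Dict.nodup_keys_counter _
    rw [List.map_id', PySem.Dict.values_eq_map_keys r hnr 0, h1, PySem.Dict.keys_counter]
    refine congrArg List.sum (List.map_congr_left (fun ch hch => ?_))
    rw [h2 ch (by rw [PySem.Dict.keys_counter]; exact hch)
        (by rw [PySem.Dict.getD_counter]; exact Int.natCast_nonneg _),
      PySem.Dict.getD_counter]
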